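-- pv_equiv track=rewrite | github.com/Vokler/wishlist-telegram-bot | bot/handlers/subscriptions.py | _convert_to_list_of_lists
-- ===== SOURCE A (Python) =====
-- def _convert_to_list_of_lists(inline_list):  # todo: make it better
--     if not inline_list:
--         return inline_list
--     K = len(inline_list) // 2 + 1
--     res = []
--     for idx in range(0, K):
--         res.append(inline_list[idx::K])
--     return res
-- ===== SOURCE B (Python) =====
-- def _convert_to_list_of_lists(inline_list):
--     if not inline_list:
--         return inline_list
--     K = len(inline_list) // 2 + 1
--     res = [[] for _ in range(K)]
--     for p, x in enumerate(inline_list):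
--         res[p % K].append(x)
--     return res
-- ===== Notes on version B (the rewrite author's own statement) =====
-- stated objective: alternative
-- what changed: Replaces K strided slices inline_list[idx::K] (one slicing pass per bucket) with K pre-created empty buckets filled in one enumerate pass appending each element to res[p % K].
import Mathlib
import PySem

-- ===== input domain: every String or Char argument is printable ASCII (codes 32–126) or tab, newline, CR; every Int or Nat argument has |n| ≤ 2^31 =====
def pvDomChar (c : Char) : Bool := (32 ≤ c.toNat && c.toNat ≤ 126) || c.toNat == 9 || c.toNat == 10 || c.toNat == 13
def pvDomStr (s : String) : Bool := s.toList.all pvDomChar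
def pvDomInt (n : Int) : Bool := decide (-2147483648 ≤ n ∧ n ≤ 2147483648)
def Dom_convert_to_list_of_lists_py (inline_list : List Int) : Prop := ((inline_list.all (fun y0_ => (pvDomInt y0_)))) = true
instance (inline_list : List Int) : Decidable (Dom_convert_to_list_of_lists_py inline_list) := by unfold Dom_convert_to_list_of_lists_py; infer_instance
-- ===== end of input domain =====

-- B replaces A's K strided slices inline_list[idx::K] by a single enumerate pass that
-- appends each element to bucket p % K (same K, same empty guard); objective: alternative decomposition.

-- ===== PORT A =====
-- Python: if not inline_list: return inline_list; K = len//2 + 1;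
--         res = []; for idx in range(0, K): res.append(inline_list[idx::K]); return res
-- (slice? is none only for step = 0; here step = K ≥ 1, so .getD [] is exact)
def convert_to_list_of_lists_py (inline_list : List Int) : List (List Int) :=
  if inline_list = [] then []
  else
    let K : Int := PySem.Int.floordiv (inline_list.length : Int) 2 + 1
    (PySem.List.pyRange 0 K 1).foldl
      (fun res idx => res ++ [(PySem.List.slice? inline_list (some idx) none K).getD []]) []

-- ===== PORT B =====
-- Python: if not inline_list: return inline_list; K = len//2 + 1;
--         res = [[] for _ in range(K)]; for p, x in enumerate(inline_list): res[p % K].append(x); return res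
def convert_to_list_of_lists_py_alt (inline_list : List Int) : List (List Int) :=
  if inline_list = [] then []
  else
    let K : Int := PySem.Int.floordiv (inline_list.length : Int) 2 + 1
    let init : List (List Int) := (PySem.List.pyRange 0 K 1).map (fun _ => [])
    (PySem.List.enumerate inline_list 0).foldl
      (fun res px =>
        PySem.List.pySetD res (PySem.Int.mod px.1 K)
          (PySem.List.pyGetD res (PySem.Int.mod px.1 K) [] ++ [px.2])) init

-- ===== PRECONDITION & SPEC =====
def Spec_convert_to_list_of_lists_py (inline_list : List Int) (out : List (List Int)) : Prop := out = convert_to_list_of_lists_py_alt inline_list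
instance (inline_list : List Int) (out : List (List Int)) : Decidable (Spec_convert_to_list_of_lists_py inline_list out) := by unfold Spec_convert_to_list_of_lists_py; infer_instance

-- ===== CLAIM (what is proved, stated in full; the proofs are below) =====
def Claim_equal_convert_to_list_of_lists_py : Prop := ∀ (inline_list : List Int), Dom_convert_to_list_of_lists_py inline_list → Spec_convert_to_list_of_lists_py inline_list (convert_to_list_of_lists_py inline_list)

-- ===== LEMMAS AND PROOFS =====

-- elements of xs at positions j, j+k, j+2k, … (the common value both ports compute per bucket)
def strideR (j k : Nat) : List Int → List Int
  | [] => []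
  | x :: xs => if j = 0 then x :: strideR (k - 1) k xs else strideR (j - 1) k xs

-- elements of xs whose absolute position (positions start at s) is ≡ j (mod k): B's bucket j
def picks (k j : Nat) : List Int → Nat → List Int
  | [], _ => []
  | x :: xs, s => if s % k = j then x :: picks k j xs (s + 1) else picks k j xs (s + 1)

theorem filterMap_pad_none (f : Nat → Option Int) (c d : Nat)
    (h : ∀ i, c ≤ i → f i = none) :
    List.filterMap f (List.range (c + d)) = List.filterMap f (List.range c) := by
  rw [List.range_add, List.filterMap_append, List.filterMap_map]
  have h2 : List.filterMap (f ∘ fun x => c + x) (List.range d) = [] := by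
    apply List.filterMap_eq_nil_iff.mpr
    intro i hi
    show f (c + i) = none
    exact h _ (Nat.le_add_right _ _)
  rw [h2, List.append_nil]

theorem filterMap_eq_strideR (k : Nat) (hk : 0 < k) :
    ∀ (xs : List Int) (j N : Nat), xs.length ≤ N →
      List.filterMap (fun i => xs[j + k * i]?) (List.range N) = strideR j k xs := by
  intro xs
  induction xs with
  | nil => intro j N _; simp [strideR]
  | cons x xs ih =>
    intro j N hN
    obtain ⟨N', rfl⟩ : ∃ N', N = N' + 1 := ⟨N - 1, by simp [List.length_cons] at hN; omega⟩
    cases j with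
    | zero =>
      rw [List.range_succ_eq_map, List.filterMap_cons, strideR, if_pos rfl]
      simp only [Nat.mul_zero, Nat.add_zero, List.getElem?_cons_zero]
      rw [List.filterMap_map]
      have heq : ∀ i ∈ List.range N', ((fun i => (x :: xs)[0 + k * i]?) ∘ Nat.succ) i
          = (fun i => xs[(k - 1) + k * i]?) i := by
        intro i _
        show (x :: xs)[0 + k * (i + 1)]? = xs[(k - 1) + k * i]?
        have hm : k * (i + 1) = k * i + k := Nat.mul_succ k i
        have : 0 + k * (i + 1) = ((k - 1) + k * i) + 1 := by omega
        rw [this, List.getElem?_cons_succ]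
      rw [List.filterMap_congr heq]
      rw [ih (k - 1) N' (by simpa using hN)]
    | succ j' =>
      rw [strideR, if_neg (Nat.succ_ne_zero j')]
      simp only [Nat.add_sub_cancel]
      have heq : ∀ i ∈ List.range (N' + 1), (fun i => (x :: xs)[(j' + 1) + k * i]?) i = (fun i => xs[j' + k * i]?) i := by
        intro i _
        show (x :: xs)[(j' + 1) + k * i]? = xs[j' + k * i]?
        have : (j' + 1) + k * i = (j' + k * i) + 1 := by omega
        rw [this, List.getElem?_cons_succ]
      rw [List.filterMap_congr heq]
      exact ih j' (N' + 1) (by simp at hN ⊢; omega)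

-- A's strided slice xs[j::k] is exactly strideR j k xs (for 0 ≤ j ≤ len, 0 < k)
theorem slice?_eq_strideR (xs : List Int) (k j : Nat) (hk : 0 < k) (hj : j ≤ xs.length) :
    PySem.List.slice? xs (some (j : Int)) none (k : Int) = some (strideR j k xs) := by
  have hkneg : ¬ ((k : Int) < 0) := by omega
  have hjneg : ¬ ((j : Int) < 0) := by omega
  have hmin : min (j : Int) (xs.length : Int) = (j : Int) := by
    simp; exact_mod_cast hj
  simp only [PySem.List.slice?, PySem.List.sliceIndices, hkneg, hjneg, if_false, hmin]
  have hk0 : ¬ ((k : Int) = 0) := by omega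
  have hkpos : (0 : Int) < (k : Int) := by omega
  rw [if_neg hk0, if_pos hkpos]
  congr 1
  -- indices are nonnegative: (↑j + ↑k * ↑x).toNat = j + k * x
  have hcongr : ∀ x ∈ List.range (if (j:Int) < (xs.length:Int) then (((xs.length:Int) - j + k - 1) / k).toNat else 0),
      (fun x => xs[((j:Int) + (k:Int) * (x:Nat)).toNat]?) x = (fun i => xs[j + k * i]?) x := by
    intro x _
    have hx : ((j:Int) + (k:Int) * (x:Nat)).toNat = j + k * x := by omega
    show xs[((j:Int) + (k:Int) * (x:Nat)).toNat]? = xs[j + k * x]?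
    rw [hx]
  rw [List.filterMap_congr hcongr]
  set c : Nat := (if (j:Int) < (xs.length:Int) then (((xs.length:Int) - j + k - 1) / k).toNat else 0) with hc
  have hbig : ∀ i, c ≤ i → xs.length ≤ j + k * i := by
    intro i hi
    by_cases hlt : (j:Int) < (xs.length:Int)
    · have hcv : c = (((xs.length:Int) - j + k - 1) / k).toNat := by rw [hc, if_pos hlt]
      set a : Int := (xs.length:Int) - j with ha
      have hdm := Int.mul_ediv_add_emod (a + k - 1) (k:Int)
      have h1 : 0 ≤ (a + k - 1) % (k:Int) := Int.emod_nonneg _ hk0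
      have h2 : (a + k - 1) % (k:Int) < (k:Int) := Int.emod_lt_of_pos _ hkpos
      have h3 : (k:Int) * ((a + k - 1) / (k:Int)) ≥ a := by omega
      have h4 : ((a + k - 1) / (k:Int)) = (c : Int) := by
        rw [hcv]
        rw [Int.toNat_of_nonneg]
        nlinarith [Int.emod_nonneg (a + (k:Int) - 1) hk0, Int.emod_lt_of_pos (a + (k:Int) - 1) hkpos]
      have h5 : (k:Int) * (c:Int) ≥ a := by rw [← h4]; exact h3
      have h6 : (k:Int) * (i:Int) ≥ (k:Int) * (c:Int) := by
        apply mul_le_mul_of_nonneg_left _ (by omega)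
        exact_mod_cast hi
      have h7 : (k:Int) * (i:Int) ≥ a := le_trans h5 h6
      have hfin : (xs.length:Int) ≤ (j:Int) + (k:Int) * (i:Int) := by omega
      exact_mod_cast hfin
    · have : j = xs.length := by omega
      omega
  have hpad := filterMap_pad_none (fun i => xs[j + k * i]?) c xs.length
    (by intro i hi; exact List.getElem?_eq_none (hbig i hi))
  rw [← hpad]
  exact filterMap_eq_strideR k hk xs j (c + xs.length) (Nat.le_add_left _ _)

-- value of ((j - s) % k) in terms of s % k, for 0 ≤ j < k
theorem emod_diff_char (j s k : Nat) (hj : j < k) :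
    ((j : Int) - s) % (k : Int)
      = if s % k ≤ j then ((j : Int) - (s % k : Nat)) else ((j : Int) - (s % k : Nat) + k) := by
  have hk0 : ((k : Int)) ≠ 0 := by omega
  have ht : s % k < k := Nat.mod_lt _ (by omega)
  have hmodcast : ((s % k : Nat) : Int) = (s : Int) % (k : Int) := by push_cast; omega
  have hA : ((j : Int) - s) % (k : Int) = ((j : Int) - ((s % k : Nat) : Int)) % (k : Int) := by
    rw [Int.sub_emod ((j : Int)) ((s : Int)), hmodcast,
      Int.sub_emod ((j : Int)) ((s : Int) % (k : Int)),
      Int.emod_emod_of_dvd _ dvd_rfl]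
  rw [hA]
  by_cases hle : s % k ≤ j
  · rw [if_pos hle]
    exact Int.emod_eq_of_lt (by omega) (by omega)
  · rw [if_neg hle]
    have hshift : ((j : Int) - ((s % k : Nat) : Int)) % (k : Int)
        = ((j : Int) - ((s % k : Nat) : Int) + (k : Int) * 1) % (k : Int) :=
      (Int.add_mul_emod_self_left _ _ _).symm
    rw [hshift, mul_one]
    exact Int.emod_eq_of_lt (by omega) (by omega)

-- B's bucket j is the elements at positions ≡ j (mod k), i.e. a stride
theorem picks_eq_strideR (k : Nat) (hk : 0 < k) :
    ∀ (xs : List Int) (s j : Nat), j < k →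
      picks k j xs s = strideR ((((j : Int) - s) % (k : Int)).toNat) k xs := by
  intro xs
  induction xs with
  | nil => intro s j _; simp [picks, strideR]
  | cons x xs ih =>
    intro s j hj
    have ht : s % k < k := Nat.mod_lt _ (by omega)
    have ht1 : (s + 1) % k < k := Nat.mod_lt _ (by omega)
    have hchar := emod_diff_char j s k hj
    have hchar1 := emod_diff_char j (s + 1) k hj
    have hsucc : (s + 1) % k = if s % k = k - 1 then 0 else s % k + 1 := by
      rcases Nat.lt_or_ge 1 k with h2 | h2
      · rw [Nat.add_mod, Nat.mod_eq_of_lt h2]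
        by_cases hend : s % k = k - 1
        · rw [if_pos hend, hend, Nat.sub_add_cancel (by omega), Nat.mod_self]
        · rw [if_neg hend, Nat.mod_eq_of_lt (by omega)]
      · have hone : k = 1 := by omega
        subst hone
        simp [Nat.mod_one]
    rw [picks, strideR]
    by_cases hcase : s % k = j
    · rw [if_pos hcase]
      have hzero : (((j : Int) - s) % (k : Int)).toNat = 0 := by rw [hchar]; omega
      rw [hzero, if_pos rfl]
      congr 1
      rw [ih (s + 1) j hj]
      congr 1
      rw [hchar1, hsucc]
      split_ifs <;> omega
    · rw [if_neg hcase]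
      have hnz : (((j : Int) - s) % (k : Int)).toNat ≠ 0 := by rw [hchar]; split_ifs <;> omega
      rw [if_neg hnz]
      rw [ih (s + 1) j hj]
      congr 1
      rw [hchar, hchar1, hsucc]
      split_ifs <;> omega

theorem getD_map_range_self (acc : List (List Int)) :
    (List.range acc.length).map (fun j => acc.getD j []) = acc := by
  apply List.ext_getElem
  · simp
  · intro i h1 h2
    simp [List.getD_eq_getElem?_getD, List.getElem?_eq_getElem h2]

-- invariant of B's single distribution pass
theorem foldl_enumerate_picks (k : Nat) (hk : 0 < k) :
    ∀ (xs : List Int) (s : Nat) (acc : List (List Int)), acc.length = k →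
      (PySem.List.enumerate xs (s : Int)).foldl
        (fun res px =>
          PySem.List.pySetD res (PySem.Int.mod px.1 (k : Int))
            (PySem.List.pyGetD res (PySem.Int.mod px.1 (k : Int)) [] ++ [px.2])) acc
      = (List.range k).map (fun j => acc.getD j [] ++ picks k j xs s) := by
  intro xs
  induction xs with
  | nil =>
    intro s acc hacc
    rw [PySem.List.enumerate_nil, List.foldl_nil]
    conv_lhs => rw [← getD_map_range_self acc, hacc]
    simp [picks]
  | cons x xs ih =>
    intro s acc hacc
    rw [PySem.List.enumerate_cons, List.foldl_cons]
    have hmod : PySem.Int.mod ((s : Nat) : Int) ((k : Nat) : Int) = ((s % k : Nat) : Int) :=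
      PySem.Int.mod_natCast s k
    have hlt : s % k < k := Nat.mod_lt _ (by omega)
    have hstep :
        (PySem.List.pySetD acc (PySem.Int.mod ((s : Nat) : Int) (k : Int))
          (PySem.List.pyGetD acc (PySem.Int.mod ((s : Nat) : Int) (k : Int)) [] ++ [x]))
        = acc.set (s % k) (acc.getD (s % k) [] ++ [x]) := by
      rw [hmod, PySem.List.pySetD_natCast, PySem.List.pyGetD_natCast]
    rw [hstep]
    have hs1 : ((s : Int) + 1) = (((s + 1 : Nat)) : Int) := by push_cast; ring
    rw [hs1, ih (s + 1) _ (by simp [hacc])]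
    apply List.map_congr_left
    intro j hj
    have hjk : j < k := List.mem_range.mp hj
    have hset : (acc.set (s % k) (acc.getD (s % k) [] ++ [x])).getD j []
        = if j = s % k then acc.getD (s % k) [] ++ [x] else acc.getD j [] := by
      by_cases hje : j = s % k
      · rw [if_pos hje, hje, List.getD_eq_getElem?_getD, List.getElem?_set_self (by omega),
          Option.getD_some]
      · rw [if_neg hje, List.getD_eq_getElem?_getD, List.getElem?_set_ne (by omega),
          ← List.getD_eq_getElem?_getD]
    rw [hset, picks]
    by_cases hje : s % k = j
    · rw [if_pos hje, if_pos hje.symm, hje, List.append_assoc, List.singleton_append]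
    · rw [if_neg hje, if_neg (fun h => hje h.symm)]

-- ===== VERDICT (by name: the statement is the Claim_ definition above) =====
theorem convert_to_list_of_lists_py_spec : Claim_equal_convert_to_list_of_lists_py := by
  unfold Claim_equal_convert_to_list_of_lists_py
  intro xs _
  unfold Spec_convert_to_list_of_lists_py
  unfold convert_to_list_of_lists_py convert_to_list_of_lists_py_alt
  by_cases hnil : xs = []
  · simp [hnil]
  · rw [if_neg hnil, if_neg hnil]
    set n : Nat := xs.length with hn
    have hn1 : 1 ≤ n := by
      rw [hn]; cases xs with | nil => exact absurd rfl hnil | cons y ys => simp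
    set kn : Nat := n / 2 + 1 with hkn
    have hK : PySem.Int.floordiv (n : Int) 2 + 1 = (kn : Int) := by
      rw [PySem.Int.floordiv_eq_ediv_of_pos (by omega)]
      rw [hkn]; push_cast; omega
    have hkpos : 0 < kn := by omega
    have hkle : kn ≤ n := by omega
    rw [hK]
    -- A side: fold of appends = map over range kn of strided slices
    rw [PySem.List.foldl_append_singleton_eq_map, List.nil_append]
    rw [PySem.List.pyRange_one 0 (kn : Int)]
    simp only [Int.sub_zero, Int.toNat_natCast, List.map_map]
    -- B side: the distribution pass
    have hinitlen : ((PySem.List.pyRange 0 (kn : Int) 1).map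
        (fun _ => ([] : List Int))).length = kn := by
      simp [PySem.List.length_pyRange_one]
    have hB := foldl_enumerate_picks kn hkpos xs 0
      ((PySem.List.pyRange 0 (kn : Int) 1).map (fun _ => ([] : List Int))) hinitlen
    simp only [Nat.cast_zero] at hB
    rw [hB]
    apply List.map_congr_left
    intro j hj
    have hjk : j < kn := List.mem_range.mp hj
    -- A's bucket j
    show (PySem.List.slice? xs (some (0 + (j : Int))) none (kn : Int)).getD []
        = _
    rw [zero_add, slice?_eq_strideR xs kn j hkpos (by omega), Option.getD_some]
    -- B's bucket j
    have hgetD : ((PySem.List.pyRange 0 (kn : Int) 1).map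
        (fun _ => ([] : List Int))).getD j [] = [] := by
      rw [List.getD_eq_getElem?_getD]
      cases hx : ((PySem.List.pyRange 0 (kn : Int) 1).map (fun _ => ([] : List Int)))[j]? with
      | none => rfl
      | some v =>
        have hmem := List.mem_of_getElem? hx
        simp only [List.mem_map] at hmem
        obtain ⟨_, _, hv⟩ := hmem
        simp [← hv]
    rw [hgetD, List.nil_append]
    rw [picks_eq_strideR kn hkpos xs 0 j hjk]
    congr 1
    rw [Nat.cast_zero, sub_zero]
    rw [Int.emod_eq_of_lt (by omega) (by exact_mod_cast hjk)]
    exact Int.toNat_natCast j
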